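-- pv_equiv track=rewrite | github.com/Devopsinitiate/eytgamingworld | doc_consolidation/engine.py | _group_similar_unique_lines
-- ===== SOURCE A (Python) =====
-- from typing import Dict, List, Set, Tuple, Optional
--
-- def _group_similar_unique_lines(unique_lines: List[str]) -> Dict[str, List[str]]:
--     """Group similar unique lines under appropriate headings."""
--     groups = {
--         "Additional Features": [],
--         "Enhanced Implementation": [],
--         "Extended Testing": [],
--         "Additional Information": []
--     }
--
--     for line in unique_lines:
--         line_lower = line.lower()
--
--         # Categorize the line based on content
--         if any(word in line_lower for word in ['feature', 'functionality', 'capability']):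
--             groups["Additional Features"].append(line)
--         elif any(word in line_lower for word in ['implementation', 'technical', 'database', 'api']):
--             groups["Enhanced Implementation"].append(line)
--         elif any(word in line_lower for word in ['test', 'testing', 'validation', 'audit']):
--             groups["Extended Testing"].append(line)
--         else:
--             groups["Additional Information"].append(line)
--
--     # Remove empty groups
--     return {title: lines for title, lines in groups.items() if lines}
-- ===== SOURCE B (Python) =====
-- RULES = [
--     ("Additional Features", ("feature", "functionality", "capability")),
--     ("Enhanced Implementation", ("implementation", "technical", "database", "api")),
--     ("Extended Testing", ("test", "testing", "validation", "audit")),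
-- ]
--
-- def _category(line):
--     low = line.lower()
--     for title, words in RULES:
--         if any(w in low for w in words):
--             return title
--     return "Additional Information"
--
-- def _group_similar_unique_lines(unique_lines):
--     result = {}
--     for title in [t for t, _ in RULES] + ["Additional Information"]:
--         bucket = [l for l in unique_lines if _category(l) == title]
--         if bucket:
--             result[title] = bucket
--     return result
-- ===== Notes on version B (the rewrite author's own statement) =====
-- stated objective: alternative
-- what changed: Replaces the single-pass if/elif chain mutating a pre-built dict of four lists by a rule table with a first-match categorizer and a per-category filter pass that builds only the non-empty groups directly, in key order.
import Mathlib
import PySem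

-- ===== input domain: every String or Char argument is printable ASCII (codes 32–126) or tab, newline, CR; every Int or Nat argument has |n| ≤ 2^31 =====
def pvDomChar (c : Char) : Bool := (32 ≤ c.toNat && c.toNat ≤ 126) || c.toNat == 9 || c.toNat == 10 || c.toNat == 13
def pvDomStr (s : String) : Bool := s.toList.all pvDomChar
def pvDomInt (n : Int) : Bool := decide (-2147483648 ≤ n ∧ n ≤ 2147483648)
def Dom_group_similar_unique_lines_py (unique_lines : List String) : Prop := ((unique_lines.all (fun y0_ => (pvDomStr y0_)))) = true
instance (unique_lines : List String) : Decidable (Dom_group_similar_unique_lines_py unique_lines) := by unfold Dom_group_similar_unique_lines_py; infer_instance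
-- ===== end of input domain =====

-- B replaces A's if/elif chain over a mutated dict by a rule table with a first-match
-- categorizer and one filter pass per category, building only the non-empty groups (alternative).

-- ===== PORT A =====
-- groups["k"].append(line) is ported as Dict.modify "k" [] (· ++ [line]); the four keys are
-- always present, so the default [] is never used and this is exact.
def group_similar_unique_lines_py (unique_lines : List String) : List (String × List String) :=
  let groups : PySem.Dict String (List String) :=
    ((((PySem.Dict.empty).insert "Additional Features" []).insert "Enhanced Implementation" []).insert
      "Extended Testing" []).insert "Additional Information" []
  let groups := unique_lines.foldl (fun g line =>
    let ll := PySem.Str.lower line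
    if ["feature", "functionality", "capability"].any (fun w => PySem.Str.isIn w ll) then
      g.modify "Additional Features" [] (fun ls => ls ++ [line])
    else if ["implementation", "technical", "database", "api"].any (fun w => PySem.Str.isIn w ll) then
      g.modify "Enhanced Implementation" [] (fun ls => ls ++ [line])
    else if ["test", "testing", "validation", "audit"].any (fun w => PySem.Str.isIn w ll) then
      g.modify "Extended Testing" [] (fun ls => ls ++ [line])
    else
      g.modify "Additional Information" [] (fun ls => ls ++ [line])) groups
  groups.items.filter (fun p => !p.2.isEmpty)

-- ===== PORT B =====
def pvRules : List (String × List String) :=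
  [("Additional Features", ["feature", "functionality", "capability"]),
   ("Enhanced Implementation", ["implementation", "technical", "database", "api"]),
   ("Extended Testing", ["test", "testing", "validation", "audit"])]

def pvFirstMatch (low : String) : List (String × List String) → Option String
  | [] => none
  | (t, ws) :: rest =>
      if ws.any (fun w => PySem.Str.isIn w low) then some t else pvFirstMatch low rest

def pvCategory (line : String) : String :=
  (pvFirstMatch (PySem.Str.lower line) pvRules).getD "Additional Information"

def group_similar_unique_lines_py_alt (unique_lines : List String) : List (String × List String) :=
  (pvRules.map Prod.fst ++ ["Additional Information"]).foldl
    (fun acc t =>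
      let bucket := unique_lines.filter (fun l => pvCategory l == t)
      if bucket.isEmpty then acc else acc ++ [(t, bucket)]) []

-- ===== PRECONDITION & SPEC =====
def Spec_group_similar_unique_lines_py (unique_lines : List String) (out : List (String × List String)) : Prop := out = group_similar_unique_lines_py_alt unique_lines
instance (unique_lines : List String) (out : List (String × List String)) : Decidable (Spec_group_similar_unique_lines_py unique_lines out) := by unfold Spec_group_similar_unique_lines_py; infer_instance

-- ===== CLAIM (what is proved, stated in full; the proofs are below) =====
def Claim_equal_group_similar_unique_lines_py : Prop := ∀ (unique_lines : List String), Dom_group_similar_unique_lines_py unique_lines → Spec_group_similar_unique_lines_py unique_lines (group_similar_unique_lines_py unique_lines)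

-- ===== LEMMAS AND PROOFS =====
def pvD4 (f1 f2 f3 f4 : List String) : PySem.Dict String (List String) :=
  ((((PySem.Dict.empty).insert "Additional Features" f1).insert "Enhanced Implementation" f2).insert
    "Extended Testing" f3).insert "Additional Information" f4

def pvBody (g : PySem.Dict String (List String)) (line : String) : PySem.Dict String (List String) :=
  let ll := PySem.Str.lower line
  if ["feature", "functionality", "capability"].any (fun w => PySem.Str.isIn w ll) then
    g.modify "Additional Features" [] (fun ls => ls ++ [line])
  else if ["implementation", "technical", "database", "api"].any (fun w => PySem.Str.isIn w ll) then
    g.modify "Enhanced Implementation" [] (fun ls => ls ++ [line])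
  else if ["test", "testing", "validation", "audit"].any (fun w => PySem.Str.isIn w ll) then
    g.modify "Extended Testing" [] (fun ls => ls ++ [line])
  else
    g.modify "Additional Information" [] (fun ls => ls ++ [line])

theorem pvCategory_eq (line : String) :
    pvCategory line =
      (if ["feature", "functionality", "capability"].any (fun w => PySem.Str.isIn w (PySem.Str.lower line)) then "Additional Features"
       else if ["implementation", "technical", "database", "api"].any (fun w => PySem.Str.isIn w (PySem.Str.lower line)) then "Enhanced Implementation"
       else if ["test", "testing", "validation", "audit"].any (fun w => PySem.Str.isIn w (PySem.Str.lower line)) then "Extended Testing"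
       else "Additional Information") := by
  simp only [pvCategory, pvFirstMatch, pvRules]
  split_ifs <;> rfl

theorem pvFold_inv (lines : List String) : ∀ (f1 f2 f3 f4 : List String),
    (lines.foldl pvBody (pvD4 f1 f2 f3 f4)).items =
      [("Additional Features", f1 ++ lines.filter (fun l => pvCategory l == "Additional Features")),
       ("Enhanced Implementation", f2 ++ lines.filter (fun l => pvCategory l == "Enhanced Implementation")),
       ("Extended Testing", f3 ++ lines.filter (fun l => pvCategory l == "Extended Testing")),
       ("Additional Information", f4 ++ lines.filter (fun l => pvCategory l == "Additional Information"))] := by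
  induction lines with
  | nil => intro f1 f2 f3 f4; simp; rfl
  | cons line rest ih =>
    intro f1 f2 f3 f4
    have hcat := pvCategory_eq line
    simp only [List.foldl_cons, List.filter_cons]
    by_cases h1 : (["feature", "functionality", "capability"].any (fun w => PySem.Str.isIn w (PySem.Str.lower line))) = true
    · have hb : pvBody (pvD4 f1 f2 f3 f4) line = pvD4 (f1 ++ [line]) f2 f3 f4 := by
        simp only [pvBody, h1, if_true]; rfl
      have hc : pvCategory line = "Additional Features" := by rw [hcat, if_pos h1]
      rw [hb, ih, hc]; simp
    · by_cases h2 : (["implementation", "technical", "database", "api"].any (fun w => PySem.Str.isIn w (PySem.Str.lower line))) = true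
      · have hb : pvBody (pvD4 f1 f2 f3 f4) line = pvD4 f1 (f2 ++ [line]) f3 f4 := by
          simp only [pvBody, h1, h2, if_true, if_false, Bool.false_eq_true]; rfl
        have hc : pvCategory line = "Enhanced Implementation" := by rw [hcat, if_neg h1, if_pos h2]
        rw [hb, ih, hc]; simp
      · by_cases h3 : (["test", "testing", "validation", "audit"].any (fun w => PySem.Str.isIn w (PySem.Str.lower line))) = true
        · have hb : pvBody (pvD4 f1 f2 f3 f4) line = pvD4 f1 f2 (f3 ++ [line]) f4 := by
            simp only [pvBody, h1, h2, h3, if_true, if_false, Bool.false_eq_true]; rfl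
          have hc : pvCategory line = "Extended Testing" := by rw [hcat, if_neg h1, if_neg h2, if_pos h3]
          rw [hb, ih, hc]; simp
        · have hb : pvBody (pvD4 f1 f2 f3 f4) line = pvD4 f1 f2 f3 (f4 ++ [line]) := by
            simp only [pvBody, h1, h2, h3, if_false, Bool.false_eq_true]; rfl
          have hc : pvCategory line = "Additional Information" := by rw [hcat, if_neg h1, if_neg h2, if_neg h3]
          rw [hb, ih, hc]; simp

-- ===== VERDICT (by name: the statement is the Claim_ definition above) =====
theorem group_similar_unique_lines_py_spec : Claim_equal_group_similar_unique_lines_py := by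
  intro unique_lines _
  unfold Spec_group_similar_unique_lines_py
  show (unique_lines.foldl pvBody (pvD4 [] [] [] [])).items.filter (fun p => !p.2.isEmpty)
      = group_similar_unique_lines_py_alt unique_lines
  rw [pvFold_inv]
  simp only [group_similar_unique_lines_py_alt, pvRules, List.map, List.cons_append,
    List.nil_append, List.foldl_cons, List.foldl_nil, List.filter_cons, List.filter_nil]
  split_ifs <;> simp_all [List.isEmpty_iff]
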